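-- pv_equiv track=rewrite | github.com/Fondamenti18/fondamenti-di-programmazione | students/AndreaSterbini/homework04/program01.py | elimina_sottoalbero
-- ===== SOURCE A (Python) =====
-- def elimina_sottoalbero(albero, x):
--     eliminati = {x}
--     if x in albero:
--         figli = albero[x]
--         if figli:
--             for y in figli:
--                 eliminati.update(elimina_sottoalbero(albero, y))
--         del albero[x]
--     return eliminati
-- ===== SOURCE B (Python) =====
-- def elimina_sottoalbero(albero, x):
--     eliminati = set()
--     stack = [(True, x)]
--     while stack:
--         enter, node = stack.pop()
--         if enter:
--             eliminati.add(node)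
--             if node in albero:
--                 stack.append((False, node))
--                 for figlio in reversed(albero[node]):
--                     stack.append((True, figlio))
--         else:
--             del albero[node]
--     return eliminati
-- ===== Notes on version B (the rewrite author's own statement) =====
-- stated objective: alternative
-- what changed: Recursive DFS that unions a fresh set per call is replaced by an iterative loop over an explicit stack of enter/exit frames accumulating into a single set (exit frames perform the deletions post-order exactly where A does); both mutate albero by deleting the reachable keys.
import Mathlib
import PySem

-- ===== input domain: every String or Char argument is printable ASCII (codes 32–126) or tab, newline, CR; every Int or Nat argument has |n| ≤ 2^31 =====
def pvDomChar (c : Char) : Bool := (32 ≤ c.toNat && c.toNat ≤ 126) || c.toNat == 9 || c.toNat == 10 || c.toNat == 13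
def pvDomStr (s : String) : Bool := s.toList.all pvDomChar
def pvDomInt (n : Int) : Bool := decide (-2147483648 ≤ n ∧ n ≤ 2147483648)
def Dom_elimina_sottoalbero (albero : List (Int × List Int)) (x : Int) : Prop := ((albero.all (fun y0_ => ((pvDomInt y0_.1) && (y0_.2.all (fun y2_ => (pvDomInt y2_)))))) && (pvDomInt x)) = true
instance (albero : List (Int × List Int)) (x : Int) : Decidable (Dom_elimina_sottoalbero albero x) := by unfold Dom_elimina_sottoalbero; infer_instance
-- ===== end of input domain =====

-- B replaces A's recursive DFS (fresh set per call, unioned upwards) by an iterative loop over an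
-- explicit stack of enter/exit frames accumulating one set; both delete the visited keys from albero
-- (same mutation), and the proof shows the returned sets are equal element-for-element.


-- ===== PORT A =====
-- A's recursion, with fuel for totality (Pre_ guarantees the fuel is never exhausted);
-- pvGoAList is the `for y in figli:` loop.
mutual
def pvGoA (n : Nat) (alb : PySem.Dict Int (List Int)) (x : Int) :
    Option (PySem.Set Int × PySem.Dict Int (List Int)) :=
  match n with
  | 0 => none
  | n+1 =>
    match PySem.Dict.get? alb x with
    | none => some (PySem.Set.ofList [x], alb)
    | some figli =>
      match (if figli.isEmpty then some (PySem.Set.ofList [x], alb)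
             else pvGoAList n figli (PySem.Set.ofList [x]) alb) with
      | none => none
      | some p => some (p.1, PySem.Dict.erase p.2 x)
termination_by (n, 0)

def pvGoAList (n : Nat) (cs : List Int) (e : PySem.Set Int) (alb : PySem.Dict Int (List Int)) :
    Option (PySem.Set Int × PySem.Dict Int (List Int)) :=
  match cs with
  | [] => some (e, alb)
  | y :: ys =>
    match pvGoA n alb y with
    | none => none
    | some r => pvGoAList n ys (PySem.Set.union e r.1) r.2
termination_by (n, cs.length + 1)
end

def elimina_sottoalbero (albero : List (Int × List Int)) (x : Int) : List Int :=
  match pvGoA (albero.length + 2) (PySem.Dict.mk albero) x with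
  | some p => p.1
  | none => []

-- ===== PORT B =====
-- B's while-loop over the explicit stack (head = top; a (true, y) frame is an enter, (false, y) an exit);
-- fuel = 2 + total weight of albero, enough for every terminating run (proved below).
def pvGoB : Nat → List (Bool × Int) → PySem.Dict Int (List Int) → PySem.Set Int → Option (List Int)
  | 0, _, _, _ => none
  | _+1, [], _, elim => some elim
  | n+1, (true, node) :: rest, alb, elim =>
    match PySem.Dict.get? alb node with
    | some figli => pvGoB n (figli.map (fun y => (true, y)) ++ (false, node) :: rest) alb (PySem.Set.add elim node)
    | none => pvGoB n rest alb (PySem.Set.add elim node)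
  | n+1, (false, node) :: rest, alb, elim => pvGoB n rest (PySem.Dict.erase alb node) elim

def pvW (l : List (Int × List Int)) : Nat := (l.map (fun p => 1 + p.2.length)).sum

def elimina_sottoalbero_alt (albero : List (Int × List Int)) (x : Int) : List Int :=
  match pvGoB (2 + pvW albero) [(true, x)] (PySem.Dict.mk albero) PySem.Set.empty with
  | some r => r
  | none => []

-- ===== PRECONDITION & SPEC =====
-- pvDbB alb x n = "every chain of key-expansions starting at x has length ≤ n" (pure, no mutation).
def pvDbB : Nat → PySem.Dict Int (List Int) → Int → Bool
  | 0, alb, x => (PySem.Dict.get? alb x).isNone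
  | n+1, alb, x =>
    match PySem.Dict.get? alb x with
    | none => true
    | some cs => cs.all (fun c => pvDbB n alb c)

-- Pre_ excludes association lists with duplicate keys (not representable as a Python dict) and inputs
-- whose part of the graph reachable from x contains a cycle, on which A raises RecursionError
-- (B's Python loop does not terminate there either).
def Pre_elimina_sottoalbero (albero : List (Int × List Int)) (x : Int) : Prop :=
  (albero.map Prod.fst).Nodup ∧ pvDbB (albero.length + 1) (PySem.Dict.mk albero) x = true

instance (albero : List (Int × List Int)) (x : Int) : Decidable (Pre_elimina_sottoalbero albero x) := by
  unfold Pre_elimina_sottoalbero; infer_instance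

def pvWitness_elimina_sottoalbero : (List (Int × List Int)) × Int :=
  ([(1, [2, 3]), (2, []), (3, [4, 2])], 1)

def Spec_elimina_sottoalbero (albero : List (Int × List Int)) (x : Int) (out : List Int) : Prop := out = elimina_sottoalbero_alt albero x
instance (albero : List (Int × List Int)) (x : Int) (out : List Int) : Decidable (Spec_elimina_sottoalbero albero x out) := by unfold Spec_elimina_sottoalbero; infer_instance

-- ===== CLAIM (what is proved, stated in full; the proofs are below) =====
def Claim_equal_elimina_sottoalbero : Prop := ∀ (albero : List (Int × List Int)) (x : Int), Dom_elimina_sottoalbero albero x → Pre_elimina_sottoalbero albero x → Spec_elimina_sottoalbero albero x (elimina_sottoalbero albero x)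

-- ===== LEMMAS AND PROOFS =====

-- depth bound, inductively (pvDbB reflected into Prop)
inductive pvDB (alb : PySem.Dict Int (List Int)) : Int → Nat → Prop
  | leaf : ∀ {y n}, PySem.Dict.get? alb y = none → pvDB alb y n
  | node : ∀ {y n cs}, PySem.Dict.get? alb y = some cs → (∀ c ∈ cs, pvDB alb c n) → pvDB alb y (n + 1)

-- reachability (reflexive-transitive) in a dict-graph
inductive pvReach (alb : PySem.Dict Int (List Int)) : Int → Int → Prop
  | refl : ∀ {y}, pvReach alb y y
  | head : ∀ {y c k cs}, PySem.Dict.get? alb y = some cs → c ∈ cs → pvReach alb c k → pvReach alb y k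

def pvWd (d : PySem.Dict Int (List Int)) : Nat := pvW d.items

lemma pv_get?_sub {d d' : PySem.Dict Int (List Int)} (hs : d'.items.Sublist d.items)
    (hn : (PySem.Dict.keys d).Nodup) {k : Int} {v : List Int}
    (h : PySem.Dict.get? d' k = some v) : PySem.Dict.get? d k = some v := by
  have hm := PySem.Dict.mem_items_of_get?_eq_some _ h
  exact PySem.Dict.get?_of_mem_items _ (List.Sublist.mem hm hs) hn

lemma pv_erase_sublist (d : PySem.Dict Int (List Int)) (k : Int) :
    (PySem.Dict.erase d k).items.Sublist d.items := by
  simp only [PySem.Dict.erase]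
  exact List.filter_sublist

lemma pv_keys_nodup_of_sublist {d d' : PySem.Dict Int (List Int)}
    (hs : d'.items.Sublist d.items) (hn : (PySem.Dict.keys d).Nodup) :
    (PySem.Dict.keys d').Nodup := by
  simp only [PySem.Dict.keys] at *
  exact (hs.map Prod.fst).nodup hn

lemma pv_find?_filter_ne (l : List (Int × List Int)) (y k : Int) (hky : k ≠ y) :
    List.find? (fun p => p.1 == k) (l.filter (fun p => !(p.1 == y)))
      = List.find? (fun p => p.1 == k) l := by
  induction l with
  | nil => rfl
  | cons p l ih =>
    by_cases hp : p.1 = y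
    · rw [List.filter_cons_of_neg (by simp [hp]),
        List.find?_cons_of_neg (by simp [hp]; omega)]
      exact ih
    · rw [List.filter_cons_of_pos (by simp [hp])]
      cases hpk : (p.1 == k) <;> simp [hpk, ih]

lemma pv_get?_erase (d : PySem.Dict Int (List Int)) (y k : Int) :
    PySem.Dict.get? (PySem.Dict.erase d y) k = if k = y then none else PySem.Dict.get? d k := by
  simp only [PySem.Dict.erase, PySem.Dict.get?]
  split
  · rename_i hky
    subst hky
    rw [List.find?_eq_none.2 ?_]
    · rfl
    · intro p hp
      have := (List.mem_filter.1 hp).2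
      simpa using this
  · rename_i hky
    rw [pv_find?_filter_ne _ _ _ hky]

lemma pv_Wd_erase {d : PySem.Dict Int (List Int)} (hn : (PySem.Dict.keys d).Nodup)
    {y : Int} {cs : List Int} (h : PySem.Dict.get? d y = some cs) :
    pvWd (PySem.Dict.erase d y) + (1 + cs.length) = pvWd d := by
  obtain ⟨l⟩ := d
  simp only [pvWd, pvW, PySem.Dict.erase, PySem.Dict.get?, PySem.Dict.keys] at h hn ⊢
  induction l with
  | nil => simp at h
  | cons q l ih =>
    simp only [List.map_cons, List.nodup_cons] at hn
    by_cases hp : q.1 = y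
    · have hfp : (q.1 == y) = true := by simp [hp]
      simp only [List.find?_cons, hfp, Option.map_some, Option.some.injEq] at h
      have hfilter : List.filter (fun r => !r.1 == y) (q :: l) = l := by
        rw [List.filter_cons_of_neg (by simp [hfp])]
        apply List.filter_eq_self.2
        intro r hr
        have hry : ¬ (r.1 = y) := fun hry => hn.1 (by rw [← hry] at hp; rw [hp]; exact List.mem_map_of_mem hr)
        simp [hry]
      rw [hfilter, ← h]
      simp only [List.map_cons, List.sum_cons]
      omega
    · have hfp : (q.1 == y) = false := by simp [hp]
      simp only [List.find?_cons, hfp] at h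
      have := ih hn.2 h
      rw [List.filter_cons_of_pos (by simp [hfp])]
      simp only [List.map_cons, List.sum_cons]
      omega

lemma pv_DB_succ {d : PySem.Dict Int (List Int)} {y : Int} {n : Nat}
    (h : pvDB d y n) : pvDB d y (n + 1) := by
  induction h with
  | leaf h => exact pvDB.leaf h
  | node h hcs ih => exact pvDB.node h (fun c hc => ih c hc)

lemma pv_DB_mono {d d' : PySem.Dict Int (List Int)} (hs : d'.items.Sublist d.items)
    (hn : (PySem.Dict.keys d).Nodup) {y : Int} {n : Nat} (h : pvDB d y n) : pvDB d' y n := by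
  induction h with
  | leaf h =>
    apply pvDB.leaf
    cases h' : PySem.Dict.get? d' _ with
    | none => rfl
    | some v => exact absurd (pv_get?_sub hs hn h') (by simp [h])
  | node hget hcs ih =>
    rename_i y n cs
    cases h' : PySem.Dict.get? d' y with
    | none => exact pvDB.leaf h'
    | some cs' =>
      have : cs' = cs := by
        have := pv_get?_sub hs hn h'
        rw [hget] at this
        exact (Option.some.inj this).symm
      subst this
      exact pvDB.node h' (fun c hc => ih c hc)

lemma pv_Reach_mono {d d' : PySem.Dict Int (List Int)} (hs : d'.items.Sublist d.items)
    (hn : (PySem.Dict.keys d).Nodup) {a b : Int} (h : pvReach d' a b) : pvReach d a b := by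
  induction h with
  | refl => exact pvReach.refl
  | head hget hc _ ih => exact pvReach.head (pv_get?_sub hs hn hget) hc ih

lemma pv_Reach_DB {d : PySem.Dict Int (List Int)} {a b : Int}
    (h : pvReach d a b) : ∀ n, pvDB d a n → pvDB d b n := by
  induction h with
  | refl => exact fun _ h => h
  | head hget hc _ ih =>
    intro n hdb
    cases hdb with
    | leaf h => simp [hget] at h
    | node h hcs =>
      rw [hget] at h
      obtain rfl := (Option.some.inj h).symm
      exact ih _ (pv_DB_succ (hcs _ hc))

lemma pv_no_loop {d : PySem.Dict Int (List Int)} {y c : Int} {cs : List Int}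
    (hget : PySem.Dict.get? d y = some cs) (hc : c ∈ cs) (hr : pvReach d c y) :
    ∀ m, ¬ pvDB d y m := by
  intro m
  induction m using Nat.strong_induction_on with
  | _ m ih =>
    intro hdb
    cases hdb with
    | leaf h => simp [hget] at h
    | node h hcs =>
      rename_i n cs'
      have hcc : cs' = cs := by rw [hget] at h; exact (Option.some.inj h).symm
      subst hcc
      exact ih n (Nat.lt_succ_self n) (pv_Reach_DB hr n (hcs c hc))

lemma pv_dbB_DB : ∀ (n : Nat) (d : PySem.Dict Int (List Int)) (x : Int),
    pvDbB n d x = true → pvDB d x n := by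
  intro n
  induction n with
  | zero =>
    intro d x h
    simp only [pvDbB, Option.isNone_iff_eq_none] at h
    exact pvDB.leaf h
  | succ n ih =>
    intro d x h
    simp only [pvDbB] at h
    cases hg : PySem.Dict.get? d x with
    | none => exact pvDB.leaf hg
    | some cs =>
      rw [hg] at h
      simp only [List.all_eq_true] at h
      exact pvDB.node hg (fun c hc => ih d c (h c hc))

-- set algebra: union is the foldl of add; assoc and small rewrites
lemma pv_update_add (s t : PySem.Set Int) (x : Int) :
    PySem.Set.update s (PySem.Set.add t x) = PySem.Set.add (PySem.Set.update s t) x := by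
  by_cases hx : x ∈ t
  · rw [PySem.Set.add_of_mem hx, PySem.Set.add_of_mem]
    exact (PySem.Set.mem_update _ _ _).2 (Or.inr hx)
  · rw [PySem.Set.add_of_not_mem hx]
    show List.foldl PySem.Set.add s (t ++ [x]) = _
    rw [List.foldl_append]
    rfl

lemma pv_union_assoc (s t u : PySem.Set Int) :
    PySem.Set.union s (PySem.Set.union t u) = PySem.Set.union (PySem.Set.union s t) u := by
  show PySem.Set.update s (PySem.Set.update t u) = PySem.Set.update (PySem.Set.update s t) u
  induction u generalizing t with
  | nil => rfl
  | cons x u' ih =>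
    show PySem.Set.update s (PySem.Set.update (PySem.Set.add t x) u') = _
    rw [ih (PySem.Set.add t x)]
    show PySem.Set.update (PySem.Set.update s (PySem.Set.add t x)) u' = _
    rw [pv_update_add]
    rfl

lemma pv_union_single (s : PySem.Set Int) (y : Int) :
    PySem.Set.union s (PySem.Set.ofList [y]) = PySem.Set.add s y := rfl

lemma pv_union_empty {e : PySem.Set Int} (he : e.Nodup) :
    PySem.Set.union PySem.Set.empty e = e := by
  show PySem.Set.ofList e = e
  exact PySem.Set.ofList_eq_self_of_nodup _ he

lemma pv_union_nodup (s t : PySem.Set Int) (hs : s.Nodup) :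
    (PySem.Set.union s t).Nodup := PySem.Set.nodup_update s t hs

-- fuel monotonicity of B's loop
lemma pv_goB_mono : ∀ (m : Nat) (s : List (Bool × Int)) (alb : PySem.Dict Int (List Int))
    (e : PySem.Set Int) (r : List Int), pvGoB m s alb e = some r →
    ∀ m', m ≤ m' → pvGoB m' s alb e = some r := by
  intro m
  induction m with
  | zero => intro s alb e r h; simp [pvGoB] at h
  | succ m ih =>
    intro s alb e r h m' hm'
    obtain ⟨m'', rfl⟩ : ∃ k, m' = k + 1 := ⟨m' - 1, by omega⟩
    have hm : m ≤ m'' := by omega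
    match s with
    | [] => simpa [pvGoB] using h
    | (true, node) :: rest =>
      simp only [pvGoB] at h ⊢
      cases hg : PySem.Dict.get? alb node <;> rw [hg] at h <;> exact ih _ _ _ _ h _ hm
    | (false, node) :: rest =>
      simp only [pvGoB] at h ⊢
      exact ih _ _ _ _ h _ hm

-- The main simulation: if the depth of the dict-graph below y is bounded, A's recursion succeeds,
-- its result is characterised, and B's loop consumes the corresponding enter frame in exactly
-- s steps, accumulating the same set.
lemma pv_main : ∀ (n : Nat) (alb : PySem.Dict Int (List Int)) (y : Int),
    pvDB alb y n → (PySem.Dict.keys alb).Nodup →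
    ∃ e alb' s,
      pvGoA (n + 1) alb y = some (e, alb') ∧
      alb'.items.Sublist alb.items ∧
      e.Nodup ∧
      (∀ k, PySem.Dict.get? alb' k ≠ PySem.Dict.get? alb k → pvReach alb y k) ∧
      s + pvWd alb' = 1 + pvWd alb ∧
      (∀ K elim m r, pvGoB m K alb' (PySem.Set.union elim e) = some r →
        pvGoB (m + s) ((true, y) :: K) alb elim = some r) := by
  intro n
  induction n with
  | zero =>
    intro alb y hdb hn
    cases hdb with
    | leaf hg =>
      refine ⟨PySem.Set.ofList [y], alb, 1, ?_, List.Sublist.refl _, PySem.Set.nodup_ofList _, ?_, by omega, ?_⟩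
      · simp [pvGoA, hg]
      · intro k hk; exact absurd rfl hk
      · intro K elim m r h
        simp only [pvGoB, hg]
        rw [← pv_union_single elim y]
        exact h
  | succ n ih =>
    -- the `for y in figli:` loop: sequential composition of the children's subtree runs
    have TL : ∀ (cs : List Int) (alb : PySem.Dict Int (List Int)) (e0 : PySem.Set Int),
        (∀ c ∈ cs, pvDB alb c n) → (PySem.Dict.keys alb).Nodup → e0.Nodup →
        ∃ e alb' s,
          pvGoAList (n + 1) cs e0 alb = some (e, alb') ∧
          alb'.items.Sublist alb.items ∧
          e.Nodup ∧
          (∀ k, PySem.Dict.get? alb' k ≠ PySem.Dict.get? alb k → ∃ c ∈ cs, pvReach alb c k) ∧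
          s + pvWd alb' = cs.length + pvWd alb ∧
          (∀ K elim m r, pvGoB m K alb' (PySem.Set.union elim e) = some r →
            pvGoB (m + s) (cs.map (fun c => (true, c)) ++ K) alb (PySem.Set.union elim e0) = some r) := by
      intro cs
      induction cs with
      | nil =>
        intro alb e0 _ _ he0
        exact ⟨e0, alb, 0, by simp [pvGoAList], List.Sublist.refl _, he0,
          fun k hk => absurd rfl hk, by simp,
          fun K elim m r h => by simpa using h⟩
      | cons c cs' ihl =>
        intro alb e0 hcs hn he0
        obtain ⟨e1, alb1, s1, hrun1, hsub1, he1, hreach1, hw1, hsim1⟩ :=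
          ih alb c (hcs c (by simp)) hn
        have hn1 : (PySem.Dict.keys alb1).Nodup := pv_keys_nodup_of_sublist hsub1 hn
        obtain ⟨e2, alb2, s2, hrun2, hsub2, he2, hreach2, hw2, hsim2⟩ :=
          ihl alb1 (PySem.Set.union e0 e1)
            (fun c' hc' => pv_DB_mono hsub1 hn (hcs c' (by simp [hc'])))
            hn1 (pv_union_nodup _ _ he0)
        refine ⟨e2, alb2, s1 + s2, ?_, hsub2.trans hsub1, he2, ?_, ?_, ?_⟩
        · show pvGoAList (n + 1) (c :: cs') e0 alb = some (e2, alb2)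
          simp only [pvGoAList]
          rw [hrun1]
          exact hrun2
        · intro k hk
          by_cases h1 : PySem.Dict.get? alb1 k = PySem.Dict.get? alb k
          · obtain ⟨c', hc', hr⟩ := hreach2 k (by rw [h1]; exact hk)
            exact ⟨c', by simp [hc'], pv_Reach_mono hsub1 hn hr⟩
          · exact ⟨c, by simp, hreach1 k h1⟩
        · simp only [List.length_cons]; omega
        · intro K elim m r h
          have step2 := hsim2 K elim m r h
          rw [pv_union_assoc] at step2
          have step1 := hsim1 (cs'.map (fun c => (true, c)) ++ K) (PySem.Set.union elim e0)
            (m + s2) r step2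
          have : (true, c) :: (cs'.map (fun c => (true, c)) ++ K)
              = (c :: cs').map (fun c => (true, c)) ++ K := by simp
          rw [this] at step1
          rw [show m + (s1 + s2) = m + s2 + s1 by omega]
          exact step1
    intro alb y hdb hn
    cases hdb with
    | leaf hg =>
      refine ⟨PySem.Set.ofList [y], alb, 1, ?_, List.Sublist.refl _, PySem.Set.nodup_ofList _, ?_, by omega, ?_⟩
      · simp [pvGoA, hg]
      · intro k hk; exact absurd rfl hk
      · intro K elim m r h
        simp only [pvGoB, hg]
        rw [← pv_union_single elim y]
        exact h
    | node hg hcs =>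
      rename_i cs
      obtain ⟨eL, albL, sL, hrunL, hsubL, heL, hreachL, hwL, hsimL⟩ :=
        TL cs alb (PySem.Set.ofList [y]) hcs hn (PySem.Set.nodup_ofList _)
      -- y's own binding survives the children's runs: otherwise y would be reachable from a child,
      -- contradicting the depth bound
      have hyL : PySem.Dict.get? albL y = some cs := by
        by_cases h : PySem.Dict.get? albL y = PySem.Dict.get? alb y
        · rw [h, hg]
        · obtain ⟨c, hc, hr⟩ := hreachL y h
          exact absurd (pvDB.node hg hcs) (pv_no_loop hg hc hr (n + 1))
      have hnL : (PySem.Dict.keys albL).Nodup := pv_keys_nodup_of_sublist hsubL hn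
      have hwE : pvWd (PySem.Dict.erase albL y) + (1 + cs.length) = pvWd albL :=
        pv_Wd_erase hnL hyL
      refine ⟨eL, PySem.Dict.erase albL y, sL + 2, ?_, (pv_erase_sublist albL y).trans hsubL,
        heL, ?_, by omega, ?_⟩
      · show pvGoA (n + 1 + 1) alb y = some (eL, PySem.Dict.erase albL y)
        simp only [pvGoA, hg]
        have hbranch : (if cs.isEmpty then some (PySem.Set.ofList [y], alb)
            else pvGoAList (n + 1) cs (PySem.Set.ofList [y]) alb)
            = pvGoAList (n + 1) cs (PySem.Set.ofList [y]) alb := by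
          cases cs with
          | nil => simp [pvGoAList]
          | cons a l => rfl
        rw [hbranch, hrunL]
      · intro k hk
        rw [pv_get?_erase] at hk
        by_cases hky : k = y
        · subst hky; exact pvReach.refl
        · rw [if_neg hky] at hk
          by_cases h : PySem.Dict.get? albL k = PySem.Dict.get? alb k
          · exact absurd h hk
          · obtain ⟨c, hc, hr⟩ := hreachL k h
            exact pvReach.head hg hc hr
      · intro K elim m r h
        -- exit step
        have hexit : pvGoB (m + 1) ((false, y) :: K) albL (PySem.Set.union elim eL) = some r := by
          simp only [pvGoB]; exact h
        -- children steps
        have hchild := hsimL ((false, y) :: K) elim (m + 1) r hexit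
        -- enter step
        rw [show m + (sL + 2) = (m + 1 + sL) + 1 by omega]
        simp only [pvGoB, hg]
        rw [← pv_union_single elim y]
        exact hchild

-- ===== VERDICT (by name: the statement is the Claim_ definition above) =====
theorem elimina_sottoalbero_spec : Claim_equal_elimina_sottoalbero := by
  intro albero x _ hpre
  obtain ⟨hnodup, hdbB⟩ := hpre
  have hn : (PySem.Dict.keys (PySem.Dict.mk albero)).Nodup := by
    simpa [PySem.Dict.keys] using hnodup
  have hdb : pvDB (PySem.Dict.mk albero) x (albero.length + 1) :=
    pv_dbB_DB _ _ _ hdbB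
  obtain ⟨e, alb', s, hrun, _, he, _, hw, hsim⟩ := pv_main (albero.length + 1) _ x hdb hn
  have hbase : pvGoB 1 ([] : List (Bool × Int)) alb' (PySem.Set.union PySem.Set.empty e)
      = some (PySem.Set.union PySem.Set.empty e) := rfl
  have hstep := hsim [] PySem.Set.empty 1 _ hbase
  have hWmk : pvWd (PySem.Dict.mk albero) = pvW albero := rfl
  have hle : 1 + s ≤ 2 + pvW albero := by rw [← hWmk]; omega
  have hB := pv_goB_mono _ _ _ _ _ hstep _ hle
  show elimina_sottoalbero albero x = elimina_sottoalbero_alt albero x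
  unfold elimina_sottoalbero elimina_sottoalbero_alt
  rw [show albero.length + 2 = albero.length + 1 + 1 from rfl, hrun, hB,
    pv_union_empty he]
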